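-- pv_equiv track=rewrite | github.com/whuang67/Python | CS412/CS412hw3_whuang67.py | getClosedPattern
-- ===== SOURCE A (Python) =====
-- import itertools
--
-- def getSubsets(row):
--     row = sorted(row)
--     subsets = []
--     for i in range(1, len(row)+1):
--         temp = list(itertools.combinations(row, i))
--         subsets.extend(temp)
--     return subsets
--
-- def LargestK(matrix):
--     Length = []
--     for row in matrix:
--         Length.append(len(row))
--     return max(Length)
--
-- def Apriori(matrix, min_sup):
--     k = 1
--     freq_pattern = {}
--     Largest_K = LargestK(matrix)
--     afterPrune = {}
--     while k <= Largest_K: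
--         pool = []
--         beforePrune = {}
--         for row in matrix:
--             items_in_row = getSubsets(row)
--             for item in items_in_row:
--                 if len(item) == k and (elem < afterPrune.keys() for elem in item):
--                     pool.append(item)
--         for pattern in pool:
--             beforePrune[pattern] = beforePrune.get(pattern, 0)+1
--         afterPrune = {}
--         for pattern, count in beforePrune.items():
--             if count >= min_sup:
--                 afterPrune[pattern] = count
--
--         freq_pattern.update(afterPrune)
--         k += 1
--
--     return freq_pattern
--
-- def getSupersets(freq_pattern):
--     supersets = {}
--     for key1 in freq_pattern.keys():
--         superset = []
--         for key2 in freq_pattern.keys():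
--             if set(list(key1)).issubset(set(list(key2))) and key1 != key2:
--                 superset.append(key2)
--         supersets[key1] = superset
--     return supersets
--
-- def getClosedPattern(matrix, min_sup):
--     freq_pattern = Apriori(matrix, min_sup)
--     supersets = getSupersets(freq_pattern)
--     closed_pattern = {}
--     for key1, value1 in supersets.items():
--         cond = [freq_pattern[key2] != freq_pattern[key1] for key2 in value1]
--         if all(cond):
--             closed_pattern[key1] = freq_pattern[key1]
--     return closed_pattern
-- ===== SOURCE B (Python) =====
-- import itertools
--
-- def getClosedPattern(matrix, min_sup):
--     # One pass: enumerate each row's subsets once, tallying supports into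
--     # per-length buckets; then concatenate buckets by length, filter by
--     # min_sup, and keep patterns with no equal-support proper superset.
--     buckets = {}  # length -> {pattern: count}
--     maxlen = 0
--     for row in matrix:
--         row = sorted(row)
--         if len(row) > maxlen:
--             maxlen = len(row)
--         for i in range(1, len(row) + 1):
--             bucket = buckets.setdefault(i, {})
--             for pat in itertools.combinations(row, i):
--                 bucket[pat] = bucket.get(pat, 0) + 1
--     freq = {}
--     for k in range(1, maxlen + 1):
--         for pat, c in buckets.get(k, {}).items():
--             if c >= min_sup:
--                 freq[pat] = c
--     closed = {}
--     for p1, v1 in freq.items():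
--         if not any(v2 == v1 and p1 != p2 and set(p1) <= set(p2)
--                    for p2, v2 in freq.items()):
--             closed[p1] = v1
--     return closed
-- ===== Notes on version B (the rewrite author's own statement) =====
-- stated objective: faster
-- what changed: A re-enumerates every row's subsets once per pattern length k (K full Apriori passes) and precomputes a supersets dictionary before the closedness filter; B enumerates each row's subsets exactly once, tallying all supports into per-length buckets in a single pass, then concatenates the buckets, filters by min_sup and checks closedness by a direct scan.
import Mathlib
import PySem

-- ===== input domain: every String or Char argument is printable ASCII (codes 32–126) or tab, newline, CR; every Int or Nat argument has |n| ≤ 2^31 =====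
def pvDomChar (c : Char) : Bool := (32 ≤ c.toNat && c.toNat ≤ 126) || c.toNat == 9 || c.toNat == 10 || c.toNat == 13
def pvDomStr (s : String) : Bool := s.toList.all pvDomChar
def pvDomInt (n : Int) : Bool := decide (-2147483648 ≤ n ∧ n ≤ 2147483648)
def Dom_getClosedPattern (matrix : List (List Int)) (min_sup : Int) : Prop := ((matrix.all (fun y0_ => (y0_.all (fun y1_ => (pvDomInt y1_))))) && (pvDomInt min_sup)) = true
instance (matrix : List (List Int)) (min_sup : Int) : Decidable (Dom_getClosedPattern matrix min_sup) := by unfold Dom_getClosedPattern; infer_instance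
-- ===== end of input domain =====

-- B replaces A's K full passes (one per pattern length, each re-enumerating every row's
-- subsets) by ONE pass that tallies all subset supports into per-length buckets, and drops
-- the supersets-dictionary precomputation in favour of a direct scan; return value only.

-- ===== PORT A =====
def pvGetSubsets (row : List Int) : List (List Int) :=
  let row := PySem.List.sorted row (fun x => x) false
  (PySem.List.pyRange 1 (PySem.List.len row + 1) 1).foldl
    (fun subsets i => subsets ++ PySem.List.combinations row i.toNat) []

-- max([]) raises ValueError: Pre_ excludes matrix = []; the .getD 0 is never reached inside Pre_
def pvLargestK (matrix : List (List Int)) : Int :=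
  let Length := matrix.foldl (fun acc row => acc ++ [PySem.List.len row]) []
  (PySem.List.max? Length (fun x => x)).getD 0

def pvAprioriStep (matrix : List (List Int)) (min_sup : Int)
    (state : PySem.Dict (List Int) Int × PySem.Dict (List Int) Int) (k : Int) :
    PySem.Dict (List Int) Int × PySem.Dict (List Int) Int :=
  let pool : List (List Int) := matrix.foldl (fun pool row =>
      (pvGetSubsets row).foldl (fun pool item =>
        -- '(elem < afterPrune.keys() for elem in item)' is a generator object: always truthy
        if PySem.List.len item = k ∧ True then pool ++ [item] else pool) pool) []
  let beforePrune : PySem.Dict (List Int) Int :=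
    pool.foldl (fun d p => d.insert p (d.getD p 0 + 1)) PySem.Dict.empty
  let afterPrune : PySem.Dict (List Int) Int :=
    beforePrune.items.foldl
      (fun d pc => if pc.2 ≥ min_sup then d.insert pc.1 pc.2 else d) PySem.Dict.empty
  (state.1.update afterPrune.items, afterPrune)

def pvApriori (matrix : List (List Int)) (min_sup : Int) : PySem.Dict (List Int) Int :=
  let Largest_K := pvLargestK matrix
  ((PySem.List.pyRange 1 (Largest_K + 1) 1).foldl (pvAprioriStep matrix min_sup)
    (PySem.Dict.empty, PySem.Dict.empty)).1

def pvGetSupersets (freq : PySem.Dict (List Int) Int) :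
    PySem.Dict (List Int) (List (List Int)) :=
  freq.keys.foldl (fun ss key1 =>
    let superset := freq.keys.foldl (fun sup key2 =>
      if PySem.Set.issubset (PySem.Set.ofList key1) (PySem.Set.ofList key2) ∧ key1 ≠ key2
      then sup ++ [key2] else sup) []
    ss.insert key1 superset) PySem.Dict.empty

def getClosedPattern (matrix : List (List Int)) (min_sup : Int) : List (List Int × Int) :=
  let freq := pvApriori matrix min_sup
  let supersets := pvGetSupersets freq
  (supersets.items.foldl (fun closed kv =>
      let cond := kv.2.map (fun key2 => decide (freq.getD key2 0 ≠ freq.getD kv.1 0))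
      if cond.all (fun b => b) then closed.insert kv.1 (freq.getD kv.1 0) else closed)
    PySem.Dict.empty).items

-- ===== PORT B =====
def getClosedPattern_alt (matrix : List (List Int)) (min_sup : Int) : List (List Int × Int) :=
  let st := matrix.foldl
    (fun (st : PySem.Dict Int (PySem.Dict (List Int) Int) × Int) row =>
      let row := PySem.List.sorted row (fun x => x) false
      let maxlen := if PySem.List.len row > st.2 then PySem.List.len row else st.2
      let buckets := (PySem.List.pyRange 1 (PySem.List.len row + 1) 1).foldl
        (fun buckets i =>
          let bucket := buckets.getD i PySem.Dict.empty
          let bucket := (PySem.List.combinations row i.toNat).foldl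
            (fun b pat => b.insert pat (b.getD pat 0 + 1)) bucket
          buckets.insert i bucket) st.1
      (buckets, maxlen)) (PySem.Dict.empty, 0)
  let freq : PySem.Dict (List Int) Int := (PySem.List.pyRange 1 (st.2 + 1) 1).foldl (fun freq k =>
      (st.1.getD k PySem.Dict.empty).items.foldl
        (fun freq pc => if pc.2 ≥ min_sup then freq.insert pc.1 pc.2 else freq) freq)
    PySem.Dict.empty
  (freq.items.foldl (fun (closed : PySem.Dict (List Int) Int) pv =>
      let bad : Bool := freq.items.any (fun qv => qv.2 == pv.2 && decide (pv.1 ≠ qv.1) &&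
          PySem.Set.issubset (PySem.Set.ofList pv.1) (PySem.Set.ofList qv.1))
      if bad then closed else closed.insert pv.1 pv.2) PySem.Dict.empty).items

-- ===== PRECONDITION & SPEC =====
-- Pre_ excludes only matrix = [], on which A raises ValueError (max() of an empty sequence)
def Pre_getClosedPattern (matrix : List (List Int)) (min_sup : Int) : Prop := matrix ≠ []
instance (matrix : List (List Int)) (min_sup : Int) : Decidable (Pre_getClosedPattern matrix min_sup) := by unfold Pre_getClosedPattern; infer_instance
def pvWitness_getClosedPattern : List (List Int) × Int := ([[1, 2], [1]], 1)

def Spec_getClosedPattern (matrix : List (List Int)) (min_sup : Int) (out : List (List Int × Int)) : Prop := out = getClosedPattern_alt matrix min_sup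
instance (matrix : List (List Int)) (min_sup : Int) (out : List (List Int × Int)) : Decidable (Spec_getClosedPattern matrix min_sup out) := by unfold Spec_getClosedPattern; infer_instance

-- ===== CLAIM (what is proved, stated in full; the proofs are below) =====
def Claim_equal_getClosedPattern : Prop := ∀ (matrix : List (List Int)) (min_sup : Int), Dom_getClosedPattern matrix min_sup → Pre_getClosedPattern matrix min_sup → Spec_getClosedPattern matrix min_sup (getClosedPattern matrix min_sup)

-- ===== LEMMAS AND PROOFS =====

-- proof-side abbreviations
def pvSortedI (r : List Int) : List Int := PySem.List.sorted r (fun x => x) false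
def pvIncr (d : PySem.Dict (List Int) Int) (p : List Int) : PySem.Dict (List Int) Int :=
  d.insert p (d.getD p 0 + 1)
def pvSubsK (matrix : List (List Int)) (k : Int) : List (List Int) :=
  matrix.flatMap (fun row => PySem.List.combinations (pvSortedI row) k.toNat)
def pvCounter (l : List (List Int)) : PySem.Dict (List Int) Int :=
  l.foldl pvIncr PySem.Dict.empty
def pvCondIns (s : Int) (d : PySem.Dict (List Int) Int) (pc : List Int × Int) :
    PySem.Dict (List Int) Int := if pc.2 ≥ s then d.insert pc.1 pc.2 else d
def pvFreq (matrix : List (List Int)) (min_sup K : Int) : PySem.Dict (List Int) Int :=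
  (PySem.List.pyRange 1 (K + 1) 1).foldl
    (fun freq k => (pvCounter (pvSubsK matrix k)).items.foldl (pvCondIns min_sup) freq)
    PySem.Dict.empty
def pvMaxLen (matrix : List (List Int)) : Int :=
  matrix.foldl (fun m row => if PySem.List.len row > m then PySem.List.len row else m) 0
def pvClosedA (freq : PySem.Dict (List Int) Int) : List (List Int × Int) :=
  ((pvGetSupersets freq).items.foldl (fun closed kv =>
      let cond := kv.2.map (fun key2 => decide (freq.getD key2 0 ≠ freq.getD kv.1 0))
      if cond.all (fun b => b) then closed.insert kv.1 (freq.getD kv.1 0) else closed)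
    PySem.Dict.empty).items
def pvClosedB (freq : PySem.Dict (List Int) Int) : List (List Int × Int) :=
  (freq.items.foldl (fun (closed : PySem.Dict (List Int) Int) pv =>
      let bad : Bool := freq.items.any (fun qv => qv.2 == pv.2 && decide (pv.1 ≠ qv.1) &&
          PySem.Set.issubset (PySem.Set.ofList pv.1) (PySem.Set.ofList qv.1))
      if bad then closed else closed.insert pv.1 pv.2) PySem.Dict.empty).items

-- generic loop shapes with a Prop-valued test
theorem pv_foldl_append_if_prop {α : Type} (p : α → Prop) [DecidablePred p] :
    ∀ (l : List α) (acc : List α),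
      l.foldl (fun acc x => if p x then acc ++ [x] else acc) acc
        = acc ++ l.filter (fun x => decide (p x)) := by
  intro l
  induction l with
  | nil => intro acc; simp
  | cons x t ih =>
      intro acc
      by_cases h : p x <;> simp [h, ih]

-- nodup keys is preserved by any fold whose step preserves it
theorem pv_nodup_keys_foldl {α κ ν : Type} [BEq κ]
    (f : PySem.Dict κ ν → α → PySem.Dict κ ν)
    (hf : ∀ d x, d.keys.Nodup → (f d x).keys.Nodup) :
    ∀ (l : List α) (d : PySem.Dict κ ν), d.keys.Nodup → (l.foldl f d).keys.Nodup := by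
  intro l
  induction l with
  | nil => intro d h; simpa using h
  | cons x t ih => intro d h; exact ih (f d x) (hf d x h)

-- getSubsets, filtered to one length, is one combinations block
theorem pv_filter_combinations (r' : List Int) (i : Nat) (k : Int) :
    (PySem.List.combinations r' i).filter (fun c => decide (PySem.List.len c = k))
      = if (i : Int) = k then PySem.List.combinations r' i else [] := by
  split_ifs with h
  · apply List.filter_eq_self.mpr
    intro c hc
    simp [PySem.List.len, PySem.List.length_of_mem_combinations hc, h]
  · apply List.filter_eq_nil_iff.mpr
    intro c hc
    simp [PySem.List.len, PySem.List.length_of_mem_combinations hc, h]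

theorem pv_flatMap_if_eq {l : List Int} (hnd : l.Nodup) (k : Int) (L : List (List Int)) :
    (l.flatMap (fun i => if i = k then L else [])) = if k ∈ l then L else [] := by
  induction l with
  | nil => simp
  | cons x t ih =>
      rcases List.nodup_cons.mp hnd with ⟨hx, hnd'⟩
      by_cases h : x = k
      · subst h
        simp [List.flatMap_cons, ih hnd', hx]
      · simp [List.flatMap_cons, h, ih hnd', Ne.symm h]

theorem pv_getSubsets_filter (row : List Int) (k : Int) (hk : 1 ≤ k) :
    (pvGetSubsets row).filter (fun c => decide (PySem.List.len c = k))
      = PySem.List.combinations (pvSortedI row) k.toNat := by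
  have hflat : pvGetSubsets row
      = (PySem.List.pyRange 1 (PySem.List.len (pvSortedI row) + 1) 1).flatMap
          (fun i => PySem.List.combinations (pvSortedI row) i.toNat) := by
    simp [pvGetSubsets, pvSortedI, List.flatMap_def]
  rw [hflat, List.filter_flatMap]
  have hcongr : ∀ i ∈ PySem.List.pyRange 1 (PySem.List.len (pvSortedI row) + 1) 1,
      (PySem.List.combinations (pvSortedI row) i.toNat).filter
          (fun c => decide (PySem.List.len c = k))
        = if i = k then PySem.List.combinations (pvSortedI row) k.toNat else [] := by
    intro i hi
    rcases PySem.List.mem_pyRange_one.mp hi with ⟨h1, _⟩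
    rw [pv_filter_combinations, Int.toNat_of_nonneg (by omega : (0:Int) ≤ i)]
    by_cases h : i = k
    · subst h; simp
    · simp [h]
  rw [List.flatMap_congr hcongr, pv_flatMap_if_eq (PySem.List.nodup_pyRange_one _ _)]
  by_cases hmem : k ∈ PySem.List.pyRange 1 (PySem.List.len (pvSortedI row) + 1) 1
  · rw [if_pos hmem]
  · rw [if_neg hmem]
    have : (pvSortedI row).length < k.toNat := by
      rw [PySem.List.mem_pyRange_one] at hmem
      simp only [PySem.List.len] at hmem
      omega
    rw [PySem.List.combinations_eq_nil_of_length_lt _ this]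

theorem pv_pool_eq (matrix : List (List Int)) (k : Int) (hk : 1 ≤ k) :
    matrix.foldl (fun pool row =>
        (pvGetSubsets row).foldl (fun pool item =>
          if PySem.List.len item = k ∧ True then pool ++ [item] else pool) pool) []
      = pvSubsK matrix k := by
  have hinner : ∀ (pool : List (List Int)) (row : List Int),
      (pvGetSubsets row).foldl (fun pool item =>
          if PySem.List.len item = k ∧ True then pool ++ [item] else pool) pool
        = pool ++ PySem.List.combinations (pvSortedI row) k.toNat := by
    intro pool row
    rw [pv_foldl_append_if_prop (fun item => PySem.List.len item = k ∧ True)]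
    congr 1
    rw [← pv_getSubsets_filter row k hk]
    simp only [and_true]
  rw [PySem.List.foldl_congr_mem _ _
        (fun pool row => pool ++ PySem.List.combinations (pvSortedI row) k.toNat) _
        (fun pool row _ => hinner pool row),
      PySem.List.foldl_append_eq_flatMap]
  simp [pvSubsK]

theorem pv_counter_keys_nodup (l : List (List Int)) : (pvCounter l).keys.Nodup := by
  exact pv_nodup_keys_foldl pvIncr
    (fun d x h => PySem.Dict.nodup_keys_insert d x _ h) l PySem.Dict.empty
    PySem.Dict.nodup_keys_empty

theorem pv_condIns_items_gen (min_sup : Int) :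
    ∀ (pcs : List (List Int × Int)) (d : PySem.Dict (List Int) Int),
      (pcs.map Prod.fst).Nodup → (∀ p ∈ pcs, p.1 ∉ d.keys) →
      (pcs.foldl (fun d pc => if pc.2 ≥ min_sup then d.insert pc.1 pc.2 else d) d).items
        = d.items ++ pcs.filter (fun pc => decide (pc.2 ≥ min_sup)) := by
  intro pcs
  induction pcs with
  | nil => intro d _ _; simp
  | cons pc t ih =>
      intro d hnd hfresh
      rcases List.nodup_cons.mp hnd with ⟨hx, hnd'⟩
      by_cases h : pc.2 ≥ min_sup
      · have hc : d.contains pc.1 = false := by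
          rw [← Bool.not_eq_true, PySem.Dict.contains_iff_mem_keys]
          exact hfresh pc (by simp)
        have hstep : (d.insert pc.1 pc.2).items = d.items ++ [(pc.1, pc.2)] :=
          PySem.Dict.items_insert_of_not_contains d pc.2 hc
        have hkeys : (d.insert pc.1 pc.2).keys = d.keys ++ [pc.1] := by
          simp [PySem.Dict.keys, hstep]
        rw [List.foldl_cons, if_pos h, ih (d.insert pc.1 pc.2) hnd' ?_, hstep]
        · simp [h]
        · intro q hq
          rw [hkeys]
          simp only [List.mem_append, List.mem_singleton]
          rintro (hm | hm)
          · exact hfresh q (by simp [hq]) hm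
          · exact hx (hm ▸ List.mem_map_of_mem hq)
      · rw [List.foldl_cons, if_neg h, ih d hnd' (fun q hq => hfresh q (by simp [hq]))]
        simp [h]

theorem pv_condIns_items (min_sup : Int) (pcs : List (List Int × Int))
    (hnd : (pcs.map Prod.fst).Nodup) :
    (pcs.foldl (fun d pc => if pc.2 ≥ min_sup then d.insert pc.1 pc.2 else d)
        PySem.Dict.empty).items
      = pcs.filter (fun pc => decide (pc.2 ≥ min_sup)) := by
  rw [pv_condIns_items_gen min_sup pcs PySem.Dict.empty hnd
        (by simp [PySem.Dict.keys, PySem.Dict.empty])]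
  simp [PySem.Dict.empty]

theorem pv_condIns_foldl_eq_filter (min_sup : Int) :
    ∀ (l : List (List Int × Int)) (d : PySem.Dict (List Int) Int),
      l.foldl (pvCondIns min_sup) d
        = (l.filter (fun pc => decide (pc.2 ≥ min_sup))).foldl
            (fun acc p => acc.insert p.1 p.2) d := by
  intro l
  induction l with
  | nil => intro d; rfl
  | cons pc t ih =>
      intro d
      by_cases h : pc.2 ≥ min_sup <;>
        simp [h, pvCondIns, ih]

def pvAP (matrix : List (List Int)) (min_sup k : Int) : PySem.Dict (List Int) Int :=
  let pool : List (List Int) := matrix.foldl (fun pool row =>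
      (pvGetSubsets row).foldl (fun pool item =>
        if PySem.List.len item = k ∧ True then pool ++ [item] else pool) pool) []
  let beforePrune : PySem.Dict (List Int) Int :=
    pool.foldl (fun d p => d.insert p (d.getD p 0 + 1)) PySem.Dict.empty
  beforePrune.items.foldl
    (fun d pc => if pc.2 ≥ min_sup then d.insert pc.1 pc.2 else d) PySem.Dict.empty

theorem pv_step_char (matrix : List (List Int)) (min_sup : Int)
    (st : PySem.Dict (List Int) Int × PySem.Dict (List Int) Int) (k : Int) :
    pvAprioriStep matrix min_sup st k
      = (st.1.update (pvAP matrix min_sup k).items, pvAP matrix min_sup k) := rfl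

theorem pv_apriori_fst (matrix : List (List Int)) (min_sup : Int) :
    ∀ (ks : List Int) (st : PySem.Dict (List Int) Int × PySem.Dict (List Int) Int),
      (ks.foldl (pvAprioriStep matrix min_sup) st).1
        = ks.foldl (fun freq k => freq.update (pvAP matrix min_sup k).items) st.1 := by
  intro ks
  induction ks with
  | nil => intro st; rfl
  | cons k t ih =>
      intro st
      rw [List.foldl_cons, List.foldl_cons, pv_step_char, ih]

theorem pv_AP_update (matrix : List (List Int)) (min_sup k : Int) (hk : 1 ≤ k)
    (freq : PySem.Dict (List Int) Int) :
    freq.update (pvAP matrix min_sup k).items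
      = (pvCounter (pvSubsK matrix k)).items.foldl (pvCondIns min_sup) freq := by
  have hbp : (pvAP matrix min_sup k)
      = (pvCounter (pvSubsK matrix k)).items.foldl
          (fun d pc => if pc.2 ≥ min_sup then d.insert pc.1 pc.2 else d)
          PySem.Dict.empty := by
    unfold pvAP
    rw [pv_pool_eq matrix k hk]
    rfl
  rw [hbp, pv_condIns_items min_sup _ (pv_counter_keys_nodup _), PySem.Dict.update,
      ← pv_condIns_foldl_eq_filter]

theorem pv_apriori_eq (matrix : List (List Int)) (min_sup : Int) :
    pvApriori matrix min_sup = pvFreq matrix min_sup (pvLargestK matrix) := by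
  unfold pvApriori pvFreq
  rw [pv_apriori_fst]
  exact PySem.List.foldl_congr_mem _ _ _ _
    (fun freq k hk => pv_AP_update matrix min_sup k
      (PySem.List.mem_pyRange_one.mp hk).1 freq)

-- B's row step, buckets component: effect on one bucket
theorem pv_getD_foldl_insert_keyed (row : List Int) :
    ∀ (l : List Int), l.Nodup → ∀ (b : PySem.Dict Int (PySem.Dict (List Int) Int)) (k : Int),
      (l.foldl (fun b i => b.insert i
          ((PySem.List.combinations (pvSortedI row) i.toNat).foldl pvIncr
            (b.getD i PySem.Dict.empty))) b).getD k PySem.Dict.empty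
        = if k ∈ l then
            (PySem.List.combinations (pvSortedI row) k.toNat).foldl pvIncr
              (b.getD k PySem.Dict.empty)
          else b.getD k PySem.Dict.empty := by
  intro l
  induction l with
  | nil => intro _ b k; simp
  | cons i t ih =>
      intro hnd b k
      rcases List.nodup_cons.mp hnd with ⟨hi, hnd'⟩
      rw [List.foldl_cons, ih hnd']
      by_cases hk : k = i
      · subst hk
        simp [hi]
      · by_cases hmem : k ∈ t <;> simp [hmem, hk, PySem.Dict.getD_insert]

def pvRowStep (st : PySem.Dict Int (PySem.Dict (List Int) Int) × Int) (row : List Int) :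
    PySem.Dict Int (PySem.Dict (List Int) Int) × Int :=
  ((PySem.List.pyRange 1 (PySem.List.len (pvSortedI row) + 1) 1).foldl
      (fun buckets i => buckets.insert i
        ((PySem.List.combinations (pvSortedI row) i.toNat).foldl pvIncr
          (buckets.getD i PySem.Dict.empty))) st.1,
   if PySem.List.len (pvSortedI row) > st.2 then PySem.List.len (pvSortedI row) else st.2)

theorem pv_rowStep_getD (b : PySem.Dict Int (PySem.Dict (List Int) Int)) (m : Int)
    (row : List Int) (k : Int) (hk : 1 ≤ k) :
    ((pvRowStep (b, m) row).1).getD k PySem.Dict.empty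
      = (PySem.List.combinations (pvSortedI row) k.toNat).foldl pvIncr
          (b.getD k PySem.Dict.empty) := by
  unfold pvRowStep
  rw [pv_getD_foldl_insert_keyed row _ (PySem.List.nodup_pyRange_one _ _)]
  by_cases hmem : k ∈ PySem.List.pyRange 1 (PySem.List.len (pvSortedI row) + 1) 1
  · rw [if_pos hmem]
  · rw [if_neg hmem]
    have : (pvSortedI row).length < k.toNat := by
      rw [PySem.List.mem_pyRange_one] at hmem
      simp only [PySem.List.len] at hmem
      omega
    rw [PySem.List.combinations_eq_nil_of_length_lt _ this, List.foldl_nil]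

theorem pv_buckets_getD (k : Int) (hk : 1 ≤ k) :
    ∀ (rows : List (List Int)) (b : PySem.Dict Int (PySem.Dict (List Int) Int)) (m : Int),
      ((rows.foldl pvRowStep (b, m)).1).getD k PySem.Dict.empty
        = (pvSubsK rows k).foldl pvIncr (b.getD k PySem.Dict.empty) := by
  intro rows
  induction rows with
  | nil => intro b m; simp [pvSubsK]
  | cons row t ih =>
      intro b m
      rw [List.foldl_cons]
      have hsplit : pvRowStep (b, m) row = ((pvRowStep (b, m) row).1, (pvRowStep (b, m) row).2) := rfl
      rw [hsplit, ih, pv_rowStep_getD b m row k hk]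
      simp [pvSubsK, List.flatMap_cons, List.foldl_append]

theorem pv_st_snd :
    ∀ (rows : List (List Int)) (b : PySem.Dict Int (PySem.Dict (List Int) Int)) (m : Int),
      (rows.foldl pvRowStep (b, m)).2
        = rows.foldl (fun m row => if PySem.List.len row > m then PySem.List.len row else m) m := by
  intro rows
  induction rows with
  | nil => intro b m; rfl
  | cons row t ih =>
      intro b m
      rw [List.foldl_cons, List.foldl_cons]
      have hstep : pvRowStep (b, m) row = ((pvRowStep (b, m) row).1,
          if PySem.List.len row > m then PySem.List.len row else m) := by
        simp [pvRowStep, PySem.List.len, pvSortedI, PySem.List.length_sorted]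
      rw [hstep, ih]

-- max() via foldl: A's LargestK equals B's running maximum (matrix nonempty)
theorem pv_max_cons :
    ∀ (t : List Int) (x : Int), PySem.List.max? (x :: t) (fun y => y)
      = some (t.foldl (fun m v => if v > m then v else m) x) := by
  intro t
  induction t with
  | nil => intro x; rfl
  | cons v t ih =>
      intro x
      have h1 : PySem.List.max? (x :: v :: t) (fun y => y)
          = PySem.List.max? ((if x < v then v else x) :: t) (fun y => y) := by
        by_cases h : x < v <;> simp [PySem.List.max?, h]
      rw [h1, ih, List.foldl_cons]

theorem pv_largestK_eq_maxLen (matrix : List (List Int)) (h : matrix ≠ []) :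
    pvLargestK matrix = pvMaxLen matrix := by
  unfold pvLargestK pvMaxLen
  rw [PySem.List.foldl_append_singleton_eq_map, List.nil_append,
      ← List.foldl_map (f := PySem.List.len)
        (g := fun m x => if x > m then x else m) (init := (0:Int))]
  have hmne : matrix.map PySem.List.len ≠ [] := fun hc => h (List.map_eq_nil_iff.mp hc)
  rcases List.exists_cons_of_ne_nil hmne with ⟨x, t, hx⟩
  rw [hx, List.foldl_cons]
  have hx0 : 0 ≤ x := by
    have hmem : x ∈ matrix.map PySem.List.len := by rw [hx]; simp
    rcases List.mem_map.mp hmem with ⟨r, _, hr⟩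
    simp [← hr, PySem.List.len]
  have h0 : (if x > 0 then x else 0) = x := by
    by_cases hc : x > 0
    · simp [hc]
    · simp [hc]; omega
  show (PySem.List.max? (x :: t) (fun x => x)).getD 0
    = List.foldl (fun m x => if x > m then x else m) (if x > 0 then x else 0) t
  rw [pv_max_cons, Option.getD_some, h0]

-- assembling the frequent-pattern dictionaries
theorem pv_freq_keys_nodup (matrix : List (List Int)) (min_sup K : Int) :
    (pvFreq matrix min_sup K).keys.Nodup := by
  refine pv_nodup_keys_foldl _ (fun d k h => ?_) _ _ PySem.Dict.nodup_keys_empty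
  refine pv_nodup_keys_foldl _ (fun d' pc h' => ?_) _ _ h
  unfold pvCondIns
  by_cases hc : pc.2 ≥ min_sup
  · rw [if_pos hc]; exact PySem.Dict.nodup_keys_insert _ _ _ h'
  · rw [if_neg hc]; exact h'

theorem pv_A_decomp (matrix : List (List Int)) (min_sup : Int) :
    getClosedPattern matrix min_sup = pvClosedA (pvApriori matrix min_sup) := rfl

theorem pv_alt_decomp (matrix : List (List Int)) (min_sup : Int) :
    getClosedPattern_alt matrix min_sup
      = pvClosedB ((PySem.List.pyRange 1 ((matrix.foldl pvRowStep (PySem.Dict.empty, 0)).2 + 1) 1).foldl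
          (fun freq k =>
            (((matrix.foldl pvRowStep (PySem.Dict.empty, 0)).1).getD k PySem.Dict.empty).items.foldl
              (pvCondIns min_sup) freq) PySem.Dict.empty) := rfl

theorem pv_alt_eq (matrix : List (List Int)) (min_sup : Int) :
    getClosedPattern_alt matrix min_sup
      = pvClosedB (pvFreq matrix min_sup (pvMaxLen matrix)) := by
  rw [pv_alt_decomp]
  congr 1
  rw [pv_st_snd matrix PySem.Dict.empty 0]
  unfold pvFreq pvMaxLen
  refine PySem.List.foldl_congr_mem _ _ _ _ (fun freq k hk => ?_)
  have hk1 : 1 ≤ k := (PySem.List.mem_pyRange_one.mp hk).1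
  rw [pv_buckets_getD k hk1 matrix PySem.Dict.empty 0]
  simp [PySem.Dict.getD_empty, pvCounter]

-- the closedness filters agree on any dictionary with distinct keys
abbrev pvQ (k1 k2 : List Int) : Prop :=
  (PySem.Set.issubset (PySem.Set.ofList k1) (PySem.Set.ofList k2) = true) ∧ k1 ≠ k2

def pvSupList (F : PySem.Dict (List Int) Int) (k1 : List Int) : List (List Int) :=
  F.keys.filter (fun k2 => decide (pvQ k1 k2))

theorem pv_items_foldl_insert_map {κ ν : Type} [BEq κ] [LawfulBEq κ] (f : κ → ν) :
    ∀ (ks : List κ) (d : PySem.Dict κ ν), ks.Nodup → (∀ k ∈ ks, k ∉ d.keys) →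
      (ks.foldl (fun d k => d.insert k (f k)) d).items = d.items ++ ks.map (fun k => (k, f k)) := by
  intro ks
  induction ks with
  | nil => intro d _ _; simp
  | cons k t ih =>
      intro d hnd hfresh
      rcases List.nodup_cons.mp hnd with ⟨hk, hnd'⟩
      have hc : d.contains k = false := by
        rw [← Bool.not_eq_true, PySem.Dict.contains_iff_mem_keys]
        exact hfresh k (by simp)
      have hstep : (d.insert k (f k)).items = d.items ++ [(k, f k)] :=
        PySem.Dict.items_insert_of_not_contains d (f k) hc
      have hkeys : (d.insert k (f k)).keys = d.keys ++ [k] := by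
        simp [PySem.Dict.keys, hstep]
      rw [List.foldl_cons, ih (d.insert k (f k)) hnd' ?_, hstep]
      · simp
      · intro q hq
        rw [hkeys]
        simp only [List.mem_append, List.mem_singleton]
        rintro (hm | hm)
        · exact hfresh q (by simp [hq]) hm
        · exact hk (hm ▸ hq)

theorem pv_supersets_items (F : PySem.Dict (List Int) Int) (hnd : F.keys.Nodup) :
    (pvGetSupersets F).items = F.keys.map (fun k1 => (k1, pvSupList F k1)) := by
  unfold pvGetSupersets
  have hbody : ∀ (ss : PySem.Dict (List Int) (List (List Int))), ∀ k1 ∈ F.keys,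
      (ss.insert k1 (F.keys.foldl (fun sup k2 =>
        if PySem.Set.issubset (PySem.Set.ofList k1) (PySem.Set.ofList k2) ∧ k1 ≠ k2
        then sup ++ [k2] else sup) []))
        = ss.insert k1 (pvSupList F k1) := by
    intro ss k1 _
    rw [pv_foldl_append_if_prop (fun k2 => pvQ k1 k2) F.keys []]
    rfl
  rw [PySem.List.foldl_congr_mem _ _ (fun ss k1 => ss.insert k1 (pvSupList F k1)) _ hbody]
  rw [pv_items_foldl_insert_map (pvSupList F) F.keys PySem.Dict.empty hnd
        (by simp [PySem.Dict.keys, PySem.Dict.empty])]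
  simp [PySem.Dict.empty]

theorem pv_closed_eq (F : PySem.Dict (List Int) Int) (hnd : F.keys.Nodup) :
    pvClosedA F = pvClosedB F := by
  unfold pvClosedA pvClosedB
  congr 1
  rw [pv_supersets_items F hnd, List.foldl_map]
  have hkeys : F.keys = F.items.map (fun p => p.1) := rfl
  rw [hkeys, List.foldl_map]
  refine PySem.List.foldl_congr_mem _ _ _ _ (fun closed pr hpr => ?_)
  have hv : F.getD pr.1 0 = pr.2 :=
    PySem.Dict.getD_of_get?_eq_some F 0 (PySem.Dict.get?_of_mem_items F (by simpa using hpr) hnd)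
  have hvq : ∀ qv ∈ F.items, F.getD qv.1 0 = qv.2 := fun qv hq =>
    PySem.Dict.getD_of_get?_eq_some F 0 (PySem.Dict.get?_of_mem_items F (by simpa using hq) hnd)
  have hbool :
      ((pvSupList F pr.1).map (fun key2 => decide (F.getD key2 0 ≠ pr.2))).all (fun b => b)
        = !(F.items.any (fun qv => qv.2 == pr.2 && decide (pr.1 ≠ qv.1) &&
            PySem.Set.issubset (PySem.Set.ofList pr.1) (PySem.Set.ofList qv.1))) := by
    rw [Bool.eq_iff_iff]
    simp only [List.all_map, List.all_eq_true, decide_eq_true_eq, Function.comp, pvSupList,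
      List.mem_filter, Bool.not_eq_true', Bool.eq_false_iff, pvQ]
    constructor
    · intro h hc
      rw [List.any_eq_true] at hc
      rcases hc with ⟨qv, hq, hb⟩
      simp only [Bool.and_eq_true, beq_iff_eq, decide_eq_true_eq] at hb
      refine h qv.1 ⟨?_, hb.2, hb.1.2⟩ ?_
      · rw [hkeys]; exact List.mem_map_of_mem hq
      · rw [hvq qv hq, hb.1.1]
    · rintro h x ⟨hxk, hsub, hne⟩ heq
      apply h
      rw [List.any_eq_true]
      rw [hkeys] at hxk
      rcases List.mem_map.mp hxk with ⟨qv, hq, rfl⟩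
      refine ⟨qv, hq, ?_⟩
      simp only [Bool.and_eq_true, beq_iff_eq, decide_eq_true_eq]
      exact ⟨⟨by rw [← hvq qv hq, heq], hne⟩, hsub⟩
  dsimp only
  rw [hv, hbool]
  cases hb : (F.items.any (fun qv => qv.2 == pr.2 && decide (pr.1 ≠ qv.1) &&
      PySem.Set.issubset (PySem.Set.ofList pr.1) (PySem.Set.ofList qv.1))) <;> simp

theorem getClosedPattern_key (matrix : List (List Int)) (min_sup : Int)
    (h : matrix ≠ []) : getClosedPattern matrix min_sup = getClosedPattern_alt matrix min_sup := by
  rw [pv_A_decomp, pv_alt_eq, pv_apriori_eq, pv_largestK_eq_maxLen matrix h]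
  exact pv_closed_eq _ (pv_freq_keys_nodup matrix min_sup (pvMaxLen matrix))

-- ===== VERDICT (by name: the statement is the Claim_ definition above) =====
theorem getClosedPattern_spec : Claim_equal_getClosedPattern := by
  intro matrix min_sup _ hpre
  unfold Spec_getClosedPattern
  exact getClosedPattern_key matrix min_sup hpre
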